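-- pv_equiv track=rewrite | github.com/queelius/computational-explorations | src/ramsey_complexity.py | coprime_adjacency
-- ===== SOURCE A (Python) =====
-- import math
-- from typing import (
--     Any,
--     Dict,
--     List,
--     Optional,
--     Sequence,
--     Set,
--     Tuple,
-- )
--
-- def coprime_adjacency(n: int) -> Dict[int, Set[int]]:
--     """Build adjacency dict for the coprime graph on [n]."""
--     adj: Dict[int, Set[int]] = {v: set() for v in range(1, n + 1)}
--     for i in range(1, n + 1):
--         for j in range(i + 1, n + 1):
--             if math.gcd(i, j) == 1:
--                 adj[i].add(j)
--                 adj[j].add(i)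
--     return adj
-- ===== SOURCE B (Python) =====
-- def coprime_adjacency(n):
--     """Build adjacency dict for the coprime graph on [n] by sieving:
--     for every divisor d greater than one, all multiples of d are mutually non-coprime; each
--     vertex's neighbours are all other vertices minus its sieved-out set."""
--     allv = range(1, n + 1)
--     bad = {v: {v} for v in allv}
--     for d in range(2, n + 1):
--         mults = range(d, n + 1, d)
--         for i in mults:
--             bad[i].update(mults)
--     return {v: set(allv) - bad[v] for v in allv}
-- ===== Notes on version B (the rewrite author's own statement) =====
-- stated objective: alternative
-- what changed: Replaces the per-pair gcd test with a divisor sieve: for every divisor greater than one it marks all pairs of its multiples as non-coprime, then reads each vertex's neighbours off the unmarked pairs.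
import Mathlib
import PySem

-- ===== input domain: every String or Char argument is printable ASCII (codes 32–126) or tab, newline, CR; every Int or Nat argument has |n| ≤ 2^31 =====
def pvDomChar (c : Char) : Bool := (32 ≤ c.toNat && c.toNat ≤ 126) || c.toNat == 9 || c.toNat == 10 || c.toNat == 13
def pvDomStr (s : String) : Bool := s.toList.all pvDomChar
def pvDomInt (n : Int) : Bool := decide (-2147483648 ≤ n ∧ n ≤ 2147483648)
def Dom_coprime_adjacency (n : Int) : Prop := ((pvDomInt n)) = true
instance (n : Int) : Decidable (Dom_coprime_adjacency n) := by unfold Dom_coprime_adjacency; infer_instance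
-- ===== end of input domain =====

-- B replaces A's pairwise gcd tests by a divisor sieve (mark pairs of multiples of each d ≥ 2);
-- a different algorithm of the same exact behaviour ("alternative", no speed claim).


-- ===== PORT A =====
-- Transliteration of A: dict {v: set()} built by a fold of inserts; double loop i, j>i adding
-- j to adj[i] and i to adj[j] when gcd(i,j)=1.  Python's adj[i].add(j) on the existing key i is
-- ported as Dict.modify i Set.empty (Set.add · j) — identical here since every key 1..n is present.
def coprime_adjacency (n : Int) : List (Int × List Int) :=
  let adj : PySem.Dict Int (PySem.Set Int) :=
    (PySem.List.pyRange 1 (n+1)).foldl (fun d v => d.insert v PySem.Set.empty) PySem.Dict.empty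
  let adj2 :=
    (PySem.List.pyRange 1 (n+1)).foldl (fun d i =>
      (PySem.List.pyRange (i+1) (n+1)).foldl (fun d j =>
        if Int.gcd i j = 1 then
          (d.modify i PySem.Set.empty (fun s => PySem.Set.add s j)).modify j
            PySem.Set.empty (fun s => PySem.Set.add s i)
        else d) d) adj
  adj2.items

-- ===== PORT B =====
-- Transliteration of Source B: {v: {v}} is a fold of inserts; bad[i].update(mults) is
-- Dict.modify i (Set.update . mults) (identical: every key 1..n is present, so the default is
-- never used); the final dict comprehension (distinct keys in iteration order = assoc list via
-- map) pairs each v with the set difference set(allv) - bad[v].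
def coprime_adjacency_alt (n : Int) : List (Int × List Int) :=
  let allv := PySem.List.pyRange 1 (n+1)
  let bad : PySem.Dict Int (PySem.Set Int) :=
    allv.foldl (fun d v => d.insert v (PySem.Set.ofList [v])) PySem.Dict.empty
  let bad2 :=
    (PySem.List.pyRange 2 (n+1)).foldl (fun b d =>
      let mults := PySem.List.pyRange d (n+1) d
      mults.foldl (fun b i => b.modify i PySem.Set.empty (fun s => PySem.Set.update s mults)) b) bad
  allv.map (fun v => (v, PySem.Set.diff (PySem.Set.ofList allv) (bad2.getD v PySem.Set.empty)))

-- ===== PRECONDITION & SPEC =====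
def Spec_coprime_adjacency (n : Int) (out : List (Int × List Int)) : Prop := out = coprime_adjacency_alt n
instance (n : Int) (out : List (Int × List Int)) : Decidable (Spec_coprime_adjacency n out) := by unfold Spec_coprime_adjacency; infer_instance

-- ===== CLAIM (what is proved, stated in full; the proofs are below) =====
def Claim_equal_coprime_adjacency : Prop := ∀ (n : Int), Dom_coprime_adjacency n → Spec_coprime_adjacency n (coprime_adjacency n)

-- ===== LEMMAS AND PROOFS =====

-- the common normal form: each vertex v paired with its coprime neighbours in increasing order
def pvCRow (n v : Int) : List Int :=
  (PySem.List.pyRange 1 (n+1)).filter (fun w => decide (w ≠ v ∧ Int.gcd v w = 1))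

def pvCanon (n : Int) : List (Int × List Int) :=
  (PySem.List.pyRange 1 (n+1)).map (fun v => (v, pvCRow n v))


-- partially-processed row of A's loop: neighbours w whose pair {k, w} has already been visited
def pvRow (n i j0 k : Int) : List Int :=
  (PySem.List.pyRange 1 (n+1)).filter
    (fun w => decide (w ≠ k ∧ Int.gcd k w = 1 ∧ (min k w < i ∨ (min k w = i ∧ max k w ≤ j0))))

lemma pv_add_not_mem {α : Type} [BEq α] [LawfulBEq α] (s : PySem.Set α) (x : α) (h : x ∉ s) :
    PySem.Set.add s x = s ++ [x] := by
  simp [PySem.Set.add, PySem.Set.contains, h]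

-- rows at j vs j-1 agree at key k unless {k,w} = {i,j} with gcd i j = 1
lemma row_succ_other (n i j k : Int) (hij : i < j)
    (hk : k ≠ i ∧ k ≠ j ∨ Int.gcd i j ≠ 1) :
    pvRow n i j k = pvRow n i (j-1) k := by
  unfold pvRow
  apply List.filter_congr
  intro w hw
  rw [PySem.List.mem_pyRange_one] at hw
  simp only [decide_eq_decide]
  by_cases hpair : (k = i ∧ w = j) ∨ (k = j ∧ w = i)
  · rcases hk with ⟨hki, hkj⟩ | hg
    · rcases hpair with ⟨h1, _⟩ | ⟨h1, _⟩ <;> omega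
    · rcases hpair with ⟨h1, h2⟩ | ⟨h1, h2⟩
      · subst h1; subst h2; simp [hg]
      · subst h1; subst h2
        rw [Int.gcd_comm] at hg
        simp [hg]
  · refine and_congr_right fun hne => and_congr_right fun _ => ?_
    rcases le_total k w with h | h <;> simp [min_def, max_def, h] <;> omega

-- past-the-end tail of the row at key i is empty
lemma row_tail_i (n i j j0 : Int) (hij : i < j) (hj0 : j0 ≤ j) :
    (PySem.List.pyRange (j+1) (n+1)).filter
      (fun w => decide (w ≠ i ∧ Int.gcd i w = 1 ∧ (min i w < i ∨ (min i w = i ∧ max i w ≤ j0)))) = [] := by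
  rw [List.filter_eq_nil_iff]
  intro w hw
  rw [PySem.List.mem_pyRange_iff_of_pos (by omega)] at hw
  have h1 : min i w = i := min_eq_left (by omega)
  have h2 : max i w = w := max_eq_right (by omega)
  simp only [decide_eq_true_eq, h1, h2, not_and, not_or]
  intro _ _
  omega

-- row at key i gains j at the right end
lemma row_succ_i (n i j : Int) (h1 : 1 ≤ i) (hij : i < j) (hjn : j ≤ n)
    (hg : Int.gcd i j = 1) :
    pvRow n i j i = pvRow n i (j-1) i ++ [j] := by
  unfold pvRow
  rw [PySem.List.pyRange_one_append 1 j (n+1) (by omega) (by omega),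
      PySem.List.pyRange_one_cons (show j < n+1 by omega), List.filter_append, List.filter_append,
      List.filter_cons, List.filter_cons]
  have e1 : (PySem.List.pyRange 1 j).filter
        (fun w => decide (w ≠ i ∧ Int.gcd i w = 1 ∧ (min i w < i ∨ (min i w = i ∧ max i w ≤ j))))
      = (PySem.List.pyRange 1 j).filter
        (fun w => decide (w ≠ i ∧ Int.gcd i w = 1 ∧ (min i w < i ∨ (min i w = i ∧ max i w ≤ j-1)))) := by
    apply List.filter_congr
    intro w hw
    rw [PySem.List.mem_pyRange_one] at hw
    simp only [decide_eq_decide]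
    refine and_congr_right fun hne => and_congr_right fun _ => ?_
    rcases le_total i w with h | h <;> simp [min_def, max_def, h] <;> omega
  have hminj : min i j = i := min_eq_left (by omega)
  have hmaxj : max i j = j := max_eq_right (by omega)
  have hpj : decide (j ≠ i ∧ Int.gcd i j = 1 ∧ (min i j < i ∨ (min i j = i ∧ max i j ≤ j))) = true := by
    simp only [hminj, hmaxj, decide_eq_true_eq]
    exact ⟨by omega, hg, Or.inr ⟨by trivial, le_rfl⟩⟩
  have hqj : decide (j ≠ i ∧ Int.gcd i j = 1 ∧ (min i j < i ∨ (min i j = i ∧ max i j ≤ j-1))) = false := by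
    simp only [hminj, hmaxj, decide_eq_false_iff_not]
    rintro ⟨_, _, h | ⟨_, h⟩⟩ <;> omega
  rw [e1, hpj, hqj, row_tail_i n i j j hij le_rfl, row_tail_i n i j (j-1) hij (by omega)]
  simp

-- past-the-end tail of the row at key j (everything > i fails)
lemma row_tail_j (n i j j0 a : Int) (hij : i < j) (ha : i < a) :
    (PySem.List.pyRange a (n+1)).filter
      (fun w => decide (w ≠ j ∧ Int.gcd j w = 1 ∧ (min j w < i ∨ (min j w = i ∧ max j w ≤ j0)))) = [] := by
  rw [List.filter_eq_nil_iff]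
  intro w hw
  rw [PySem.List.mem_pyRange_one] at hw
  simp only [decide_eq_true_eq, not_and, not_or]
  intro hne _
  have hmin : i < min j w := by
    rcases le_total j w with h | h <;> simp [min_def, max_def, h] <;> omega
  exact ⟨by omega, fun h => absurd h (by omega)⟩

-- row at key j gains i at the right end
lemma row_succ_j (n i j : Int) (h1 : 1 ≤ i) (hij : i < j) (hjn : j ≤ n)
    (hg : Int.gcd i j = 1) :
    pvRow n i j j = pvRow n i (j-1) j ++ [i] := by
  unfold pvRow
  rw [PySem.List.pyRange_one_append 1 i (n+1) (by omega) (by omega),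
      PySem.List.pyRange_one_cons (show i < n+1 by omega), List.filter_append, List.filter_append,
      List.filter_cons, List.filter_cons]
  have e1 : (PySem.List.pyRange 1 i).filter
        (fun w => decide (w ≠ j ∧ Int.gcd j w = 1 ∧ (min j w < i ∨ (min j w = i ∧ max j w ≤ j))))
      = (PySem.List.pyRange 1 i).filter
        (fun w => decide (w ≠ j ∧ Int.gcd j w = 1 ∧ (min j w < i ∨ (min j w = i ∧ max j w ≤ j-1)))) := by
    apply List.filter_congr
    intro w hw
    rw [PySem.List.mem_pyRange_one] at hw
    simp only [decide_eq_decide]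
    refine and_congr_right fun hne => and_congr_right fun _ => ?_
    rcases le_total j w with h | h <;> simp [min_def, max_def, h] <;> omega
  have hmini : min j i = i := min_eq_right (by omega)
  have hmaxi : max j i = j := max_eq_left (by omega)
  have hgc : Int.gcd j i = 1 := by rw [Int.gcd_comm]; exact hg
  have hpj : decide (i ≠ j ∧ Int.gcd j i = 1 ∧ (min j i < i ∨ (min j i = i ∧ max j i ≤ j))) = true := by
    simp only [hmini, hmaxi, decide_eq_true_eq]
    exact ⟨by omega, hgc, Or.inr ⟨by trivial, le_rfl⟩⟩
  have hqj : decide (i ≠ j ∧ Int.gcd j i = 1 ∧ (min j i < i ∨ (min j i = i ∧ max j i ≤ j-1))) = false := by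
    simp only [hmini, hmaxi, decide_eq_false_iff_not]
    rintro ⟨_, _, h | ⟨_, h⟩⟩ <;> omega
  rw [e1, hpj, hqj, row_tail_j n i j j (i+1) hij (by omega),
      row_tail_j n i j (j-1) (i+1) hij (by omega)]
  simp

def pvStep (i : Int) (d : PySem.Dict Int (PySem.Set Int)) (j : Int) : PySem.Dict Int (PySem.Set Int) :=
  if Int.gcd i j = 1 then
    (d.modify i PySem.Set.empty (fun s => PySem.Set.add s j)).modify j
      PySem.Set.empty (fun s => PySem.Set.add s i)
  else d

def pvInv (n i j0 : Int) (d : PySem.Dict Int (PySem.Set Int)) : Prop :=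
  d.keys = PySem.List.pyRange 1 (n+1) ∧
  ∀ k, k ∈ PySem.List.pyRange 1 (n+1) → d.getD k PySem.Set.empty = pvRow n i j0 k

lemma i_not_mem_row (n i j : Int) (hij : i < j) : i ∉ pvRow n i (j-1) j := by
  intro hmem
  rw [pvRow, List.mem_filter, decide_eq_true_eq] at hmem
  obtain ⟨-, ⟨-, -, hd⟩⟩ := hmem
  have e1 : min j i = i := min_eq_right (by omega)
  have e2 : max j i = j := max_eq_left (by omega)
  rcases hd with h | ⟨-, h⟩ <;> omega

lemma j_not_mem_row (n i j : Int) (hij : i < j) : j ∉ pvRow n i (j-1) i := by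
  intro hmem
  rw [pvRow, List.mem_filter, decide_eq_true_eq] at hmem
  obtain ⟨-, ⟨-, -, hd⟩⟩ := hmem
  have e1 : min i j = i := min_eq_left (by omega)
  have e2 : max i j = j := max_eq_right (by omega)
  rcases hd with h | ⟨-, h⟩ <;> omega

lemma step_inv (n i j : Int) (h1 : 1 ≤ i) (hij : i < j) (hjn : j ≤ n)
    (d : PySem.Dict Int (PySem.Set Int)) (h : pvInv n i (j-1) d) :
    pvInv n i j (pvStep i d j) := by
  obtain ⟨hkeys, hget⟩ := h
  have hmemi : i ∈ PySem.List.pyRange 1 (n+1) := PySem.List.mem_pyRange_one.mpr ⟨by omega, by omega⟩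
  have hmemj : j ∈ PySem.List.pyRange 1 (n+1) := PySem.List.mem_pyRange_one.mpr ⟨by omega, by omega⟩
  unfold pvStep
  by_cases hg : Int.gcd i j = 1
  · rw [if_pos hg]
    have hci : d.contains i = true := (PySem.Dict.contains_iff_mem_keys d i).mpr (hkeys ▸ hmemi)
    have k1 : (d.modify i PySem.Set.empty (fun s => PySem.Set.add s j)).keys = d.keys := by
      rw [PySem.Dict.keys_modify, PySem.Dict.keys_insert_of_contains _ _ hci]
    have hcj : (d.modify i PySem.Set.empty (fun s => PySem.Set.add s j)).contains j = true := by
      rw [PySem.Dict.contains_iff_mem_keys, k1, hkeys]; exact hmemj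
    constructor
    · rw [PySem.Dict.keys_modify, PySem.Dict.keys_insert_of_contains _ _ hcj, k1, hkeys]
    · intro k hk
      rw [PySem.Dict.getD_modify]
      by_cases hkj : k = j
      · subst hkj
        rw [if_pos rfl, PySem.Dict.getD_modify, if_neg (show k ≠ i by omega), hget k hk,
            pv_add_not_mem _ _ (i_not_mem_row n i k hij), row_succ_j n i k h1 hij hjn hg]
      · rw [if_neg hkj, PySem.Dict.getD_modify]
        by_cases hki : k = i
        · subst hki
          rw [if_pos rfl, hget k hk, pv_add_not_mem _ _ (j_not_mem_row n k j hij),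
              row_succ_i n k j h1 hij hjn hg]
        · rw [if_neg hki, hget k hk, ← row_succ_other n i j k hij (Or.inl ⟨hki, hkj⟩)]
  · rw [if_neg hg]
    exact ⟨hkeys, fun k hk => by
      rw [hget k hk, ← row_succ_other n i j k hij (Or.inr hg)]⟩

lemma inner_loop (n i : Int) (h1 : 1 ≤ i) (hin : i ≤ n) :
    ∀ (m : Nat) (j0 : Int), i ≤ j0 → j0 ≤ n → n - j0 ≤ m →
    ∀ d, pvInv n i j0 d →
    pvInv n i n ((PySem.List.pyRange (j0+1) (n+1)).foldl (pvStep i) d) := by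
  intro m
  induction m with
  | zero =>
    intro j0 hj0 hj0n hm d hd
    have he : j0 = n := by omega
    subst he
    rw [PySem.List.pyRange_one_eq_nil (by omega)]
    exact hd
  | succ m ih =>
    intro j0 hj0 hj0n hm d hd
    by_cases hlt : j0 < n
    · rw [PySem.List.pyRange_one_cons (show j0+1 < n+1 by omega), List.foldl_cons]
      have hd' : pvInv n i (j0 + 1 - 1) d := by
        have e : j0 + 1 - 1 = j0 := by omega
        rw [e]; exact hd
      exact ih (j0+1) (by omega) (by omega) (by omega) _
        (step_inv n i (j0+1) h1 (by omega) (by omega) d hd')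
    · have he : j0 = n := by omega
      subst he
      rw [PySem.List.pyRange_one_eq_nil (by omega)]
      exact hd

lemma row_shift (n i k : Int) (hk : 1 ≤ k ∧ k < n+1) (hi : 1 ≤ i) :
    pvRow n i n k = pvRow n (i+1) (i+1) k := by
  unfold pvRow
  apply List.filter_congr
  intro w hw
  rw [PySem.List.mem_pyRange_one] at hw
  simp only [decide_eq_decide]
  refine and_congr_right fun hne => and_congr_right fun _ => ?_
  rcases le_total k w with h | h <;> simp [min_def, max_def, h] <;> omega

def pvOuterStep (n : Int) (d : PySem.Dict Int (PySem.Set Int)) (i : Int) :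
    PySem.Dict Int (PySem.Set Int) :=
  (PySem.List.pyRange (i+1) (n+1)).foldl (pvStep i) d

lemma outer_loop (n : Int) : ∀ (m : Nat) (i : Int), 1 ≤ i → i ≤ n+1 → n+1-i ≤ m →
    ∀ d, pvInv n i i d →
    pvInv n (n+1) (n+1) ((PySem.List.pyRange i (n+1)).foldl (pvOuterStep n) d) := by
  intro m
  induction m with
  | zero =>
    intro i hi hi2 hm d hd
    have he : i = n+1 := by omega
    subst he
    rw [PySem.List.pyRange_one_eq_nil (by omega)]
    exact hd
  | succ m ih =>
    intro i hi hi2 hm d hd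
    by_cases hlt : i < n+1
    · rw [PySem.List.pyRange_one_cons hlt, List.foldl_cons]
      have hinner := inner_loop n i hi (by omega) (n - i).toNat i le_rfl (by omega) (by omega) d hd
      have hshift : pvInv n (i+1) (i+1) ((PySem.List.pyRange (i+1) (n+1)).foldl (pvStep i) d) :=
        ⟨hinner.1, fun k hk => by
          rw [hinner.2 k hk, row_shift n i k (PySem.List.mem_pyRange_one.mp hk) hi]⟩
      exact ih (i+1) (by omega) (by omega) (by omega) _ hshift
    · have he : i = n+1 := by omega
      subst he
      rw [PySem.List.pyRange_one_eq_nil (by omega)]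
      exact hd

def pvInit (n : Int) : PySem.Dict Int (PySem.Set Int) :=
  (PySem.List.pyRange 1 (n+1)).foldl (fun d v => d.insert v PySem.Set.empty) PySem.Dict.empty

lemma pv_ofList_self {α : Type} [BEq α] [LawfulBEq α] {l : List α} (h : l.Nodup) :
    PySem.Set.ofList l = l := by simp [pysem, h]

lemma nodup_pyRange_one (a b : Int) : (PySem.List.pyRange a b).Nodup := by
  have H : ∀ (m : Nat) (a : Int), b - a ≤ m → (PySem.List.pyRange a b).Nodup := by
    intro m
    induction m with
    | zero =>
      intro a ha
      rw [PySem.List.pyRange_one_eq_nil (by omega)]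
      exact List.nodup_nil
    | succ m ih =>
      intro a ha
      by_cases h : a < b
      · rw [PySem.List.pyRange_one_cons h]
        refine List.nodup_cons.mpr ⟨?_, ih (a+1) (by omega)⟩
        intro hmem
        rw [PySem.List.mem_pyRange_one] at hmem
        omega
      · rw [PySem.List.pyRange_one_eq_nil (by omega)]
        exact List.nodup_nil
  exact H (b - a).toNat a (by omega)

lemma getD_init (l : List Int) (d : PySem.Dict Int (PySem.Set Int)) (k : Int)
    (h : d.getD k PySem.Set.empty = PySem.Set.empty) :
    (l.foldl (fun d v => d.insert v PySem.Set.empty) d).getD k PySem.Set.empty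
      = PySem.Set.empty := by
  induction l generalizing d with
  | nil => exact h
  | cons v t ih =>
    rw [List.foldl_cons]
    apply ih
    rw [PySem.Dict.getD_insert]
    split
    · rfl
    · exact h

lemma row_init (n k : Int) (hk : 1 ≤ k) : pvRow n 1 1 k = [] := by
  rw [pvRow, List.filter_eq_nil_iff]
  intro w hw
  rw [PySem.List.mem_pyRange_one] at hw
  simp only [decide_eq_true_eq, not_and, not_or]
  intro hne _
  have h1 : 1 ≤ min k w := le_min (by omega) (by omega)
  have h2 : w ≤ max k w := le_max_right k w
  have h3 : k ≤ max k w := le_max_left k w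
  have h4 : min k w ≤ k := min_le_left k w
  have h5 : min k w ≤ w := min_le_right k w
  exact ⟨by omega, fun heq hc => by omega⟩

lemma init_inv (n : Int) : pvInv n 1 1 (pvInit n) := by
  constructor
  · have h := PySem.Dict.keys_foldl_insert (PySem.List.pyRange 1 (n+1))
      (fun _ _ => PySem.Set.empty) (PySem.Dict.empty (κ := Int) (ν := PySem.Set Int))
    rw [pvInit]
    rw [show (fun (d : PySem.Dict Int (PySem.Set Int)) (v : Int) => d.insert v PySem.Set.empty)
        = (fun d x => d.insert x ((fun _ _ => PySem.Set.empty) d x)) from rfl, h]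
    rw [show (PySem.Dict.empty (κ := Int) (ν := PySem.Set Int)).keys = [] from rfl]
    rw [show PySem.Set.update ([] : PySem.Set Int) (PySem.List.pyRange 1 (n+1))
        = PySem.Set.ofList (PySem.List.pyRange 1 (n+1)) from rfl]
    exact pv_ofList_self (nodup_pyRange_one _ _)
  · intro k hk
    rw [PySem.List.mem_pyRange_one] at hk
    rw [pvInit, getD_init _ _ _ (by simp [pysem]), row_init n k (by omega)]
    rfl

lemma row_final (n k : Int) (hk : 1 ≤ k ∧ k < n+1) :
    pvRow n (n+1) (n+1) k = pvCRow n k := by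
  rw [pvRow, pvCRow]
  apply List.filter_congr
  intro w hw
  rw [PySem.List.mem_pyRange_one] at hw
  simp only [decide_eq_decide]
  refine ⟨fun ⟨a, b, _⟩ => ⟨a, b⟩, fun ⟨a, b⟩ => ⟨a, b, Or.inl ?_⟩⟩
  exact lt_of_le_of_lt (min_le_left k w) (by omega)

lemma canon_eq_a (n : Int) : coprime_adjacency n = pvCanon n := by
  have hdef : coprime_adjacency n
      = ((PySem.List.pyRange 1 (n+1)).foldl (pvOuterStep n) (pvInit n)).items := rfl
  by_cases hn : 0 ≤ n
  · obtain ⟨hkeys, hget⟩ := outer_loop n (n + 1 - 1).toNat 1 le_rfl (by omega) (by omega)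
      (pvInit n) (init_inv n)
    rw [hdef, PySem.Dict.items_eq_map_keys _ (by rw [hkeys]; exact nodup_pyRange_one _ _)
        PySem.Set.empty, hkeys, pvCanon]
    apply List.map_congr_left
    intro k hk
    rw [hget k hk, row_final n k (PySem.List.mem_pyRange_one.mp hk)]
  · rw [hdef, pvCanon, PySem.List.pyRange_one_eq_nil (show n+1 ≤ 1 by omega)]
    rw [show pvInit n = PySem.Dict.empty by
      rw [pvInit, PySem.List.pyRange_one_eq_nil (show n+1 ≤ 1 by omega)]
      rfl]
    rfl


-- membership in the value at v of the initial dict {v: {v}}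
lemma getD_badinit (l : List Int) (d : PySem.Dict Int (PySem.Set Int)) (k : Int) :
    (l.foldl (fun d v => d.insert v (PySem.Set.ofList [v])) d).getD k PySem.Set.empty
      = if k ∈ l then PySem.Set.ofList [k] else d.getD k PySem.Set.empty := by
  induction l generalizing d with
  | nil => simp
  | cons v t ih =>
    rw [List.foldl_cons, ih, PySem.Dict.getD_insert]
    by_cases hkt : k ∈ t
    · simp [hkt]
    · by_cases hkv : k = v
      · subst hkv; simp [hkt]
      · simp [hkt, hkv]

lemma mem_sieve_inner (ms l : List Int) (b : PySem.Dict Int (PySem.Set Int)) (v w : Int) :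
    w ∈ (l.foldl (fun b i => b.modify i PySem.Set.empty (fun s => PySem.Set.update s ms)) b).getD
        v PySem.Set.empty
      ↔ w ∈ b.getD v PySem.Set.empty ∨ (v ∈ l ∧ w ∈ ms) := by
  induction l generalizing b with
  | nil => simp
  | cons i t ih =>
    rw [List.foldl_cons, ih, PySem.Dict.getD_modify]
    by_cases hvi : v = i
    · subst hvi
      simp [PySem.Set.mem_update]
      tauto
    · simp [hvi]

lemma mem_sieve (n : Int) (l : List Int) (b : PySem.Dict Int (PySem.Set Int)) (v w : Int) :
    w ∈ (l.foldl (fun b d =>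
        let mults := PySem.List.pyRange d (n+1) d
        mults.foldl (fun b i => b.modify i PySem.Set.empty (fun s => PySem.Set.update s mults)) b) b).getD
        v PySem.Set.empty
      ↔ w ∈ b.getD v PySem.Set.empty
        ∨ ∃ d ∈ l, v ∈ PySem.List.pyRange d (n+1) d ∧ w ∈ PySem.List.pyRange d (n+1) d := by
  induction l generalizing b with
  | nil => simp
  | cons d t ih =>
    rw [List.foldl_cons, ih, mem_sieve_inner]
    simp
    tauto

lemma noncop_iff (n v w : Int) (hv : 1 ≤ v ∧ v < n+1) (hw : 1 ≤ w ∧ w < n+1) :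
    (∃ d ∈ PySem.List.pyRange 2 (n+1),
        v ∈ PySem.List.pyRange d (n+1) d ∧ w ∈ PySem.List.pyRange d (n+1) d)
      ↔ Int.gcd v w ≠ 1 := by
  constructor
  · rintro ⟨d, hd, h1, h2⟩
    rw [PySem.List.mem_pyRange_one] at hd
    rw [PySem.List.mem_pyRange_iff_of_pos (by omega)] at h1 h2
    have hdv : d ∣ v := by
      have := dvd_add h1.2.2 (dvd_refl d)
      simpa using this
    have hdw : d ∣ w := by
      have := dvd_add h2.2.2 (dvd_refl d)
      simpa using this
    have hdg : d.natAbs ∣ Int.gcd v w :=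
      Nat.dvd_gcd (Int.natAbs_dvd_natAbs.mpr hdv) (Int.natAbs_dvd_natAbs.mpr hdw)
    have hgpos : 0 < Int.gcd v w := by
      rcases Nat.eq_zero_or_pos (Int.gcd v w) with h | h
      · rw [Int.gcd_eq_zero_iff] at h; omega
      · exact h
    have h1 := Nat.le_of_dvd hgpos hdg
    have h2 : d.natAbs = d.toNat := by omega
    omega
  · intro hg
    have hv0 : v ≠ 0 := by omega
    have hgcd0 : Int.gcd v w ≠ 0 := by
      simp [Int.gcd_eq_zero_iff]
      intro h; exact absurd h hv0
    set g : Int := (Int.gcd v w : Int) with hgdef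
    have hg2 : 2 ≤ g := by omega
    have hgv : g ∣ v := Int.gcd_dvd_left v w
    have hgw : g ∣ w := Int.gcd_dvd_right v w
    have hglev : g ≤ v := Int.le_of_dvd (by omega) hgv
    have hglew : g ≤ w := Int.le_of_dvd (by omega) hgw
    refine ⟨g, ?_, ?_, ?_⟩
    · rw [PySem.List.mem_pyRange_one]; omega
    · rw [PySem.List.mem_pyRange_iff_of_pos (by omega)]
      exact ⟨by omega, by omega, dvd_sub hgv dvd_rfl⟩
    · rw [PySem.List.mem_pyRange_iff_of_pos (by omega)]
      exact ⟨by omega, by omega, dvd_sub hgw dvd_rfl⟩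

lemma diff_key (n v : Int) (S : PySem.Set Int)
    (h : ∀ w, 1 ≤ w → w < n+1 → (w ∈ S ↔ (w = v ∨ Int.gcd v w ≠ 1))) :
    PySem.Set.diff (PySem.Set.ofList (PySem.List.pyRange 1 (n+1))) S = pvCRow n v := by
  rw [pv_ofList_self (nodup_pyRange_one 1 (n+1))]
  show (PySem.List.pyRange 1 (n+1)).filter _ = pvCRow n v
  rw [pvCRow]
  apply List.filter_congr
  intro w hwmem
  rw [PySem.List.mem_pyRange_one] at hwmem
  have hiff := h w (by omega) (by omega)
  have hcont : PySem.Set.contains S w = decide (w = v ∨ Int.gcd v w ≠ 1) := by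
    by_cases hm : w ∈ S
    · simp [PySem.Set.contains, hm, hiff.mp hm]
    · have hneg : ¬(w = v ∨ Int.gcd v w ≠ 1) := fun hx => hm (hiff.mpr hx)
      simp [PySem.Set.contains, hm, hneg]
  rw [hcont]
  by_cases h1 : w = v <;> by_cases h2 : Int.gcd v w = 1 <;> simp [h1, h2]

lemma canon_eq_alt (n : Int) : coprime_adjacency_alt n = pvCanon n := by
  have hdef : coprime_adjacency_alt n =
      (PySem.List.pyRange 1 (n+1)).map (fun v =>
        (v, PySem.Set.diff (PySem.Set.ofList (PySem.List.pyRange 1 (n+1)))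
          (((PySem.List.pyRange 2 (n+1)).foldl (fun b d =>
              let mults := PySem.List.pyRange d (n+1) d
              mults.foldl (fun b i =>
                b.modify i PySem.Set.empty (fun s => PySem.Set.update s mults)) b)
            ((PySem.List.pyRange 1 (n+1)).foldl
              (fun d v => d.insert v (PySem.Set.ofList [v])) PySem.Dict.empty)).getD
            v PySem.Set.empty))) := rfl
  rw [hdef, pvCanon]
  apply List.map_congr_left
  intro v hv
  rw [PySem.List.mem_pyRange_one] at hv
  congr 1
  apply diff_key
  intro w hw1 hw2
  rw [mem_sieve, getD_badinit, if_pos (PySem.List.mem_pyRange_one.mpr ⟨by omega, by omega⟩),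
      noncop_iff n v w ⟨by omega, by omega⟩ ⟨by omega, by omega⟩]
  simp

-- ===== VERDICT (by name: the statement is the Claim_ definition above) =====
theorem coprime_adjacency_spec : Claim_equal_coprime_adjacency := by
  intro n _
  unfold Spec_coprime_adjacency
  rw [canon_eq_a, canon_eq_alt]
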